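-- pv_equiv track=rewrite | github.com/Male-D1ng/Ex.Python | practica7.py | ceroEnPosParIn
-- ===== SOURCE A (Python) =====
-- def ceroEnPosParIn(l:list[int])-> list:
--     listaNueva: list = []
--     for i in range(len(l)):
--         if i % 2 == 0:
--             listaNueva.append(0)
--         else:
--             listaNueva.append(i)
--     return listaNueva
-- ===== SOURCE B (Python) =====
-- def ceroEnPosParIn(l: list[int]) -> list:
--     res = [0] * len(l)
--     res[1::2] = range(1, len(l), 2)
--     return res
-- ===== Notes on version B (the rewrite author's own statement) =====
-- stated objective: idiomatic
-- what changed: Replaces the element-by-element loop with an if/else branch by preallocating a zero list and overwriting the odd positions in one strided slice assignment res[1::2] = range(1, len(l), 2).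
import Mathlib
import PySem

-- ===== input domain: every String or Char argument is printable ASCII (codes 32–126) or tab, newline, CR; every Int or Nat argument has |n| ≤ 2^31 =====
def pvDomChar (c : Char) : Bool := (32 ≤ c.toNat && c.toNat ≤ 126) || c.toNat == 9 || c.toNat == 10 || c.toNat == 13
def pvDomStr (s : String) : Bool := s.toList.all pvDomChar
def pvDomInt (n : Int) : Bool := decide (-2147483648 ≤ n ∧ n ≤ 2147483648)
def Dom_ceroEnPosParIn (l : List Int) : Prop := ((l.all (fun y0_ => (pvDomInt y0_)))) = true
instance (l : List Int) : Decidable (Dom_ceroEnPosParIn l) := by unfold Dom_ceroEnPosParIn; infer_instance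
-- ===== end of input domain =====

-- B builds the all-zeros list first and fills the odd slots by one strided slice assignment
-- instead of A's append-per-index loop with an if/else branch (idiomatic; same O(n) cost).

-- ===== PORT A =====
def ceroEnPosParIn (l : List Int) : List Int :=
  (PySem.List.pyRange 0 l.length 1).foldl
    (fun listaNueva i =>
      if PySem.Int.mod i 2 == 0 then listaNueva ++ [(0 : Int)] else listaNueva ++ [i])
    []

-- ===== PORT B =====
-- res[1::2] = vs : replace every odd-index slot of the base list by the next value of vs
-- (in Source B the right-hand side's length always matches the slice, so both run out together)
def pvAssignOdd : List Int → List Int → List Int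
  | b0 :: _ :: rest, v :: vs => b0 :: v :: pvAssignOdd rest vs
  | base, _ => base

def ceroEnPosParIn_alt (l : List Int) : List Int :=
  pvAssignOdd (List.replicate l.length (0 : Int)) (PySem.List.pyRange 1 l.length 2)

-- ===== PRECONDITION & SPEC =====
def Spec_ceroEnPosParIn (l : List Int) (out : List Int) : Prop := out = ceroEnPosParIn_alt l
instance (l : List Int) (out : List Int) : Decidable (Spec_ceroEnPosParIn l out) := by unfold Spec_ceroEnPosParIn; infer_instance

-- ===== CLAIM (what is proved, stated in full; the proofs are below) =====
def Claim_equal_ceroEnPosParIn : Prop := ∀ (l : List Int), Dom_ceroEnPosParIn l → Spec_ceroEnPosParIn l (ceroEnPosParIn l)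

-- ===== LEMMAS AND PROOFS =====

-- the value A appends at absolute index i
def pvG (i : Int) : Int := if PySem.Int.mod i 2 == 0 then 0 else i

theorem pvG_even (c : Nat) : pvG (2 * (c : Int)) = 0 := by
  simp [pvG, PySem.Int.mod, Int.mul_fmod_right]

theorem pvG_odd (c : Nat) : pvG (2 * (c : Int) + 1) = 2 * (c : Int) + 1 := by
  have h : (2 * (c : Int) + 1).fmod 2 = 1 := by
    rw [show (2 * (c : Int) + 1) = 1 + 2 * (c : Int) by ring, Int.add_mul_fmod_self_left]
    decide
  simp [pvG, PySem.Int.mod, h]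

-- step-2 range, empty and cons forms
theorem pvRange2_nil (a b : Int) (h : b ≤ a) : PySem.List.pyRange a b 2 = [] := by
  rw [PySem.List.pyRange_of_pos a b (by norm_num)]
  simp [show ¬ a < b by omega]

theorem pvRange2_cons (a b : Int) (h : a < b) :
    PySem.List.pyRange a b 2 = a :: PySem.List.pyRange (a + 2) b 2 := by
  rw [PySem.List.pyRange_of_pos a b (by norm_num),
      PySem.List.pyRange_of_pos (a + 2) b (by norm_num)]
  by_cases h2 : a + 2 < b
  · have hm : ((b - a + 2 - 1) / 2).toNat = ((b - (a + 2) + 2 - 1) / 2).toNat + 1 := by omega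
    simp only [if_pos h, if_pos h2, hm, List.range_succ_eq_map, List.map_cons, List.map_map]
    congr 1
    · simp
    · apply List.map_congr_left
      intro k _
      simp only [Function.comp_apply, Nat.succ_eq_add_one]
      push_cast
      ring
  · have hm : ((b - a + 2 - 1) / 2).toNat = 1 := by omega
    simp [if_pos h, if_neg h2, hm, List.range_succ]

-- range k+2 split into its first two indices and the rest shifted by 2
theorem pvRange_add_two (k : Nat) :
    List.range (k + 2) = 0 :: 1 :: (List.range k).map (fun j => j + 2) := by
  rw [List.range_succ_eq_map, List.range_succ_eq_map]
  simp [List.map_cons, List.map_map, Function.comp, Nat.succ_eq_add_one]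

-- core invariant: assigning range(2c+1, 2c+k, 2) into k zeros yields A's values from index 2c on
theorem pvKey : ∀ (k c : Nat),
    pvAssignOdd (List.replicate k (0 : Int))
      (PySem.List.pyRange (2 * (c : Int) + 1) (2 * (c : Int) + (k : Int)) 2)
      = (List.range k).map (fun (j : Nat) => pvG (2 * (c : Int) + (j : Int)))
  | 0, c => by
      rw [pvRange2_nil _ _ (by omega)]
      simp [pvAssignOdd]
  | 1, c => by
      rw [pvRange2_nil _ _ (by omega)]
      simp [pvAssignOdd, List.range_succ]
      have := pvG_even c
      simpa using this.symm
  | (k + 2), c => by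
      have hlt : 2 * (c : Int) + 1 < 2 * (c : Int) + ((k : Int) + 2) := by omega
      rw [show ((k + 2 : Nat) : Int) = (k : Int) + 2 by push_cast; ring,
          pvRange2_cons _ _ hlt]
      have hsh : (2 * (c : Int) + 1) + 2 = 2 * ((c + 1 : Nat) : Int) + 1 := by push_cast; ring
      have hst : 2 * (c : Int) + ((k : Int) + 2) = 2 * ((c + 1 : Nat) : Int) + (k : Int) := by
        push_cast; ring
      rw [hsh, hst]
      show pvAssignOdd ((0 : Int) :: (0 : Int) :: List.replicate k (0 : Int)) _ = _
      rw [pvAssignOdd, pvKey k (c + 1)]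
      rw [pvRange_add_two]
      simp only [List.map_cons, List.map_map]
      refine congrArg₂ _ ?_ (congrArg₂ _ ?_ ?_)
      · simpa using (pvG_even c).symm
      · simpa using (pvG_odd c).symm
      · apply List.map_congr_left
        intro j _
        simp only [Function.comp_apply]
        congr 1
        push_cast
        ring

theorem pvA_eq (l : List Int) :
    ceroEnPosParIn l = (List.range l.length).map (fun (j : Nat) => pvG (j : Int)) := by
  unfold ceroEnPosParIn
  rw [show (l.length : Int) = ((l.length : Nat) : Int) from rfl, PySem.List.pyRange_zero_nat]
  have hfun : (fun (acc : List Int) (i : Int) =>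
      if PySem.Int.mod i 2 == 0 then acc ++ [(0 : Int)] else acc ++ [i])
      = fun acc i => acc ++ [pvG i] := by
    funext acc i
    unfold pvG
    split <;> rfl
  rw [hfun, List.foldl_map, PySem.List.foldl_append_singleton_eq_map]
  simp only [List.nil_append]

theorem pvB_eq (l : List Int) :
    ceroEnPosParIn_alt l = (List.range l.length).map (fun (j : Nat) => pvG (j : Int)) := by
  unfold ceroEnPosParIn_alt
  have h := pvKey l.length 0
  simp only [Nat.cast_zero, mul_zero, zero_add] at h
  rw [h]

-- ===== VERDICT (by name: the statement is the Claim_ definition above) =====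
theorem ceroEnPosParIn_spec : Claim_equal_ceroEnPosParIn := by
  intro l _
  unfold Spec_ceroEnPosParIn
  rw [pvA_eq, pvB_eq]
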